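-- pv_equiv track=rewrite | github.com/dannyallover/tuned_lens_applications | dev/data.py | get_specialized_indices
-- ===== SOURCE A (Python) =====
-- def get_specialized_indices(label_indx_vals: list, context_pos: int) -> tuple:
--     """
--     Get,
--     1) position of all labels before |context_pos| that match with the label at
--     |context_pos|,
--     2) position of all preceding label tokens at or before |context_pos| that
--     match with the label at |context_pos|,
--     3) position of all labels before |context_pos|, and
--     4) position of all preceding label tokens at or before |context_pos|.
--
--     Parameters
--     ----------
--     label_indx_vals: required, list
--         The positions of the labels and preceding label tokens, coupled with
--         the class that they map to.
--
--     Returns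
--     ------
--     _: tuple
--         Tuple containing the same label indices, same preceding label indices,
--         label indices, and preceding label indices.
--     """
--     label_indx_vals_ = label_indx_vals[: context_pos + 1]
--     lab_indices_same, prec_lab_indices_same, lab_indices, prec_lab_indices = (
--         [],
--         [],
--         [],
--         [],
--     )
--     indx = 0
--     for lab_tups in label_indx_vals_:
--         if lab_tups[0][1] == label_indx_vals_[-1][-1][1]:
--             lab_indices_same += [indx + i + 1 for i in range(len(lab_tups[1:]))]
--             prec_lab_indices_same.append(indx)
--         lab_indices += [indx + i + 1 for i in range(len(lab_tups[1:]))]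
--         prec_lab_indices.append(indx)
--         indx += len(lab_tups)
--
--     return (
--         lab_indices_same[: -(len(label_indx_vals_[-1]) - 1)],
--         lab_indices[: -(len(label_indx_vals_[-1]) - 1)],
--         prec_lab_indices_same[:-1],
--         prec_lab_indices[:-1],
--     )
-- ===== SOURCE B (Python) =====
-- def get_specialized_indices(label_indx_vals: list, context_pos: int) -> tuple:
--     vals = label_indx_vals[: context_pos + 1]
--     target = vals[-1][-1][1]
--     # Flatten the nested structure into one flat record per token position:
--     # (is_preceding_token_flag, class of its tuple).
--     tokens = []
--     for t in vals:
--         cls = t[0][1]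
--         tokens.append((True, cls))
--         tokens.extend((False, cls) for _ in t[1:])
--     # Each output list is a filter of the enumerated flat token stream.
--     prec = [i for i, (st, _) in enumerate(tokens) if st]
--     prec_same = [i for i, (st, c) in enumerate(tokens) if st and c == target]
--     lab = [i for i, (st, _) in enumerate(tokens) if not st]
--     lab_same = [i for i, (st, c) in enumerate(tokens) if not st and c == target]
--     cut = len(vals[-1]) - 1
--     return (lab_same[:-cut], lab[:-cut], prec_same[:-1], prec[:-1])
-- ===== Notes on version B (the rewrite author's own statement) =====
-- stated objective: alternative
-- what changed: A threads a mutable running offset through one loop over the tuples, emitting index ranges per tuple; B flattens the nested input into one flat record per token position (start-flag, class) and derives each of the four lists as a filter of the enumerated flat token stream, so no offset arithmetic or per-tuple ranges remain.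
import Mathlib
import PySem

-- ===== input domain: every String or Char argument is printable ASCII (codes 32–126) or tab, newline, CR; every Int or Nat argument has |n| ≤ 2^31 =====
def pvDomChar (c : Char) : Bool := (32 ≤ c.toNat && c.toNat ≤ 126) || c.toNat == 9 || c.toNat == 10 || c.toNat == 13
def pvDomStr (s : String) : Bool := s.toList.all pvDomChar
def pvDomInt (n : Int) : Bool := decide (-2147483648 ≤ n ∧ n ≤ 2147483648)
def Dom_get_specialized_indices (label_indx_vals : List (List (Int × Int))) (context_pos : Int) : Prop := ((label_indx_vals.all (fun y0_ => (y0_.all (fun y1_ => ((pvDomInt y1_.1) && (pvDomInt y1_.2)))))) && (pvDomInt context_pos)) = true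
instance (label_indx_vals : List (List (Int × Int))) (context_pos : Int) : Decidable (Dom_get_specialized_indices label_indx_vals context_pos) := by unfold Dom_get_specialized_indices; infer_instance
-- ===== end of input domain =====

-- B flattens the nested input into one record per token position and filters the enumerated
-- flat stream (alternative decomposition of A's running-index loop); equal return value on Pre_.

-- ===== PORT A =====
-- the body of A's for-loop: state = (lab_indices_same, prec_lab_indices_same, lab_indices, prec_lab_indices, indx)
def pvBodyA (vals : List (List (Int × Int)))
    (s : List Int × List Int × List Int × List Int × Int) (lab_tups : List (Int × Int)) :
    List Int × List Int × List Int × List Int × Int :=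
  let indx := s.2.2.2.2
  let newRange := (PySem.List.pyRange 0 (((PySem.List.slice lab_tups (some 1) none).length : Nat) : Int) 1).map
      (fun i => indx + i + 1)
  if (PySem.List.pyGetD lab_tups 0 ((0, 0) : Int × Int)).2
      = (PySem.List.pyGetD (PySem.List.pyGetD vals (-1) ([] : List (Int × Int))) (-1) ((0, 0) : Int × Int)).2 then
    (s.1 ++ newRange, s.2.1 ++ [indx], s.2.2.1 ++ newRange, s.2.2.2.1 ++ [indx], indx + (lab_tups.length : Int))
  else
    (s.1, s.2.1, s.2.2.1 ++ newRange, s.2.2.2.1 ++ [indx], indx + (lab_tups.length : Int))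

def get_specialized_indices (label_indx_vals : List (List (Int × Int))) (context_pos : Int) :
    List Int × List Int × List Int × List Int :=
  let vals := PySem.List.slice label_indx_vals none (some (context_pos + 1))
  let r := vals.foldl (pvBodyA vals) ([], [], [], [], 0)
  let k : Int := ((PySem.List.pyGetD vals (-1) ([] : List (Int × Int))).length : Int) - 1
  (PySem.List.slice r.1 none (some (-k)),
   PySem.List.slice r.2.2.1 none (some (-k)),
   PySem.List.slice r.2.1 none (some (-1)),
   PySem.List.slice r.2.2.2.1 none (some (-1)))

-- ===== PORT B =====
-- flat token records of one tuple: (is_start_flag, class); cls = t[0][1]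
def pvTokOf (t : List (Int × Int)) : List (Bool × Int) :=
  let cls := (PySem.List.pyGetD t 0 ((0, 0) : Int × Int)).2
  (true, cls) :: (PySem.List.slice t (some 1) none).map (fun _ => (false, cls))

def get_specialized_indices_alt (label_indx_vals : List (List (Int × Int))) (context_pos : Int) :
    List Int × List Int × List Int × List Int :=
  let vals := PySem.List.slice label_indx_vals none (some (context_pos + 1))
  let target := (PySem.List.pyGetD (PySem.List.pyGetD vals (-1) ([] : List (Int × Int))) (-1) ((0, 0) : Int × Int)).2
  let en := PySem.List.enumerate (vals.flatMap pvTokOf) 0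
  let prec := (en.filter (fun p => p.2.1)).map (·.1)
  let precSame := (en.filter (fun p => p.2.1 && p.2.2 == target)).map (·.1)
  let lab := (en.filter (fun p => !p.2.1)).map (·.1)
  let labSame := (en.filter (fun p => !p.2.1 && p.2.2 == target)).map (·.1)
  let cut : Int := ((PySem.List.pyGetD vals (-1) ([] : List (Int × Int))).length : Int) - 1
  (PySem.List.slice labSame none (some (-cut)),
   PySem.List.slice lab none (some (-cut)),
   PySem.List.slice precSame none (some (-1)),
   PySem.List.slice prec none (some (-1)))

-- ===== PRECONDITION & SPEC =====
-- Pre_ excludes exactly the inputs where Python A raises IndexError: an empty slice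
-- label_indx_vals[:context_pos+1] (its [-1] is taken) or an empty tuple inside the slice
-- (lab_tups[0] / [-1][-1] is taken).  B raises there too.
def Pre_get_specialized_indices (label_indx_vals : List (List (Int × Int))) (context_pos : Int) : Prop :=
  PySem.List.slice label_indx_vals none (some (context_pos + 1)) ≠ [] ∧
  ∀ t ∈ PySem.List.slice label_indx_vals none (some (context_pos + 1)), t ≠ []
instance (label_indx_vals : List (List (Int × Int))) (context_pos : Int) : Decidable (Pre_get_specialized_indices label_indx_vals context_pos) := by unfold Pre_get_specialized_indices; infer_instance

def pvWitness_get_specialized_indices : (List (List (Int × Int))) × Int :=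
  ([[(5, 1), (6, 1)], [(7, 2)], [(9, 1), (10, 1)]], 2)

def Spec_get_specialized_indices (label_indx_vals : List (List (Int × Int))) (context_pos : Int) (out : List Int × List Int × List Int × List Int) : Prop := out = get_specialized_indices_alt label_indx_vals context_pos
instance (label_indx_vals : List (List (Int × Int))) (context_pos : Int) (out : List Int × List Int × List Int × List Int) : Decidable (Spec_get_specialized_indices label_indx_vals context_pos out) := by unfold Spec_get_specialized_indices; infer_instance

-- ===== CLAIM (what is proved, stated in full; the proofs are below) =====
def Claim_equal_get_specialized_indices : Prop := ∀ (label_indx_vals : List (List (Int × Int))) (context_pos : Int), Dom_get_specialized_indices label_indx_vals context_pos → Pre_get_specialized_indices label_indx_vals context_pos → Spec_get_specialized_indices label_indx_vals context_pos (get_specialized_indices label_indx_vals context_pos)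

-- ===== LEMMAS AND PROOFS =====

-- filtered enumerations of a constant false-flag block (the non-start tokens of one tuple)
lemma pvRepTok (c : Int) :
    ∀ (n : Nat) (s : Int),
    ((PySem.List.enumerate (List.replicate n ((false : Bool), c)) s).filter (fun p => !p.2.1)).map (·.1)
      = PySem.List.pyRange s (s + n) 1 := by
  intro n
  induction n with
  | zero => intro s; simp [PySem.List.enumerate_nil, PySem.List.pyRange_one_eq_nil]
  | succ m ih =>
      intro s
      rw [List.replicate_succ, PySem.List.enumerate_cons, List.filter_cons]
      have hb : s + ((m + 1 : Nat) : Int) = s + 1 + (m : Int) := by push_cast; ring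
      simp only [hb]
      rw [PySem.List.pyRange_one_cons (by omega)]
      simp [ih]

lemma pvRepTokSame (c tgt : Int) :
    ∀ (n : Nat) (s : Int),
    ((PySem.List.enumerate (List.replicate n ((false : Bool), c)) s).filter
        (fun p => !p.2.1 && p.2.2 == tgt)).map (·.1)
      = if c == tgt then PySem.List.pyRange s (s + n) 1 else [] := by
  intro n
  induction n with
  | zero => intro s; simp [PySem.List.enumerate_nil, PySem.List.pyRange_one_eq_nil]
  | succ m ih =>
      intro s
      rw [List.replicate_succ, PySem.List.enumerate_cons, List.filter_cons]
      have hb : s + ((m + 1 : Nat) : Int) = s + 1 + (m : Int) := by push_cast; ring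
      by_cases hc : c == tgt
      · simp only [hb, hc, if_true]
        rw [PySem.List.pyRange_one_cons (by omega)]
        simp [ih, hc]
      · simp [ih, hc]

lemma pvRepPrec (c : Int) :
    ∀ (n : Nat) (s : Int),
    (PySem.List.enumerate (List.replicate n ((false : Bool), c)) s).filter (fun p => p.2.1) = [] := by
  intro n
  induction n with
  | zero => intro s; simp [PySem.List.enumerate_nil]
  | succ m ih =>
      intro s
      rw [List.replicate_succ, PySem.List.enumerate_cons, List.filter_cons]
      simp [ih]

lemma pvRepPrecSame (c tgt : Int) :
    ∀ (n : Nat) (s : Int),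
    (PySem.List.enumerate (List.replicate n ((false : Bool), c)) s).filter
        (fun p => p.2.1 && p.2.2 == tgt) = [] := by
  intro n
  induction n with
  | zero => intro s; simp [PySem.List.enumerate_nil]
  | succ m ih =>
      intro s
      rw [List.replicate_succ, PySem.List.enumerate_cons, List.filter_cons]
      simp [ih]

-- A's per-tuple emitted range is the shifted pyRange
lemma pvShiftRange (indx : Int) (m : Nat) :
    (PySem.List.pyRange 0 ((m : Nat) : Int) 1).map (fun i => indx + i + 1)
      = PySem.List.pyRange (indx + 1) (indx + 1 + m) 1 := by
  simp [PySem.List.pyRange_one, List.map_map]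
  intro k _hk
  omega

-- head-block values of the four filtered enumerations of one tuple's tokens
lemma pvHeadTok (t : List (Int × Int)) (indx : Int) :
    ((PySem.List.enumerate (pvTokOf t) indx).filter (fun p => !p.2.1)).map (·.1)
      = (PySem.List.pyRange 0 (((PySem.List.slice t (some 1) none).length : Nat) : Int) 1).map
          (fun i => indx + i + 1) := by
  rw [pvShiftRange]
  simp only [pvTokOf, PySem.List.enumerate_cons, List.filter_cons]
  simp [pvRepTok]

lemma pvHeadTokSame (t : List (Int × Int)) (indx tgt : Int) :
    ((PySem.List.enumerate (pvTokOf t) indx).filter (fun p => !p.2.1 && p.2.2 == tgt)).map (·.1)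
      = if (PySem.List.pyGetD t 0 ((0,0) : Int × Int)).2 == tgt then
          (PySem.List.pyRange 0 (((PySem.List.slice t (some 1) none).length : Nat) : Int) 1).map
            (fun i => indx + i + 1)
        else [] := by
  rw [pvShiftRange]
  simp only [pvTokOf, PySem.List.enumerate_cons, List.filter_cons]
  by_cases hc : (PySem.List.pyGetD t 0 ((0,0) : Int × Int)).2 == tgt
  · simp [pvRepTokSame, hc]
  · simp [pvRepTokSame, hc]

lemma pvHeadPrec (t : List (Int × Int)) (indx : Int) :
    ((PySem.List.enumerate (pvTokOf t) indx).filter (fun p => p.2.1)).map (·.1) = [indx] := by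
  simp only [pvTokOf, PySem.List.enumerate_cons, List.filter_cons]
  simp [pvRepPrec]

lemma pvHeadPrecSame (t : List (Int × Int)) (indx tgt : Int) :
    ((PySem.List.enumerate (pvTokOf t) indx).filter (fun p => p.2.1 && p.2.2 == tgt)).map (·.1)
      = if (PySem.List.pyGetD t 0 ((0,0) : Int × Int)).2 == tgt then [indx] else [] := by
  simp only [pvTokOf, PySem.List.enumerate_cons, List.filter_cons]
  by_cases hc : (PySem.List.pyGetD t 0 ((0,0) : Int × Int)).2 == tgt
  · simp [pvRepPrecSame, hc]
  · simp [pvRepPrecSame, hc]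

-- A's fold equals B's filtered enumerations (over any suffix l with running offset indx)
lemma pvFoldA (vals : List (List (Int × Int))) (l : List (List (Int × Int)))
    (hcl : ∀ t ∈ l, t ≠ []) :
    ∀ (a b c d : List Int) (indx : Int),
    l.foldl (pvBodyA vals) (a, b, c, d, indx)
      = (a ++ ((PySem.List.enumerate (l.flatMap pvTokOf) indx).filter
              (fun p => !p.2.1 && p.2.2 == (PySem.List.pyGetD (PySem.List.pyGetD vals (-1) ([] : List (Int × Int))) (-1) ((0,0) : Int × Int)).2)).map (·.1),
         b ++ ((PySem.List.enumerate (l.flatMap pvTokOf) indx).filter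
              (fun p => p.2.1 && p.2.2 == (PySem.List.pyGetD (PySem.List.pyGetD vals (-1) ([] : List (Int × Int))) (-1) ((0,0) : Int × Int)).2)).map (·.1),
         c ++ ((PySem.List.enumerate (l.flatMap pvTokOf) indx).filter (fun p => !p.2.1)).map (·.1),
         d ++ ((PySem.List.enumerate (l.flatMap pvTokOf) indx).filter (fun p => p.2.1)).map (·.1),
         indx + ((l.map (fun t => (t.length : Int))).sum)) := by
  induction l with
  | nil => intro a b c d indx; simp [PySem.List.enumerate_nil]
  | cons t r ih =>
      intro a b c d indx
      have ht : t ≠ [] := hcl t (List.mem_cons_self)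
      have hlen : ((pvTokOf t).length : Int) = (t.length : Int) := by
        simp [pvTokOf, PySem.List.slice_from_one]
        have := List.length_pos_iff.mpr ht
        omega
      rw [List.flatMap_cons, PySem.List.enumerate_append, hlen]
      simp only [List.filter_append, List.map_append]
      rw [pvHeadTok, pvHeadTokSame, pvHeadPrec, pvHeadPrecSame, List.foldl_cons]
      by_cases h : (PySem.List.pyGetD t 0 ((0,0) : Int × Int)).2
          = (PySem.List.pyGetD (PySem.List.pyGetD vals (-1) ([] : List (Int × Int))) (-1) ((0,0) : Int × Int)).2
      · rw [show pvBodyA vals (a, b, c, d, indx) t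
            = (a ++ (PySem.List.pyRange 0 (((PySem.List.slice t (some 1) none).length : Nat) : Int) 1).map (fun i => indx + i + 1),
               b ++ [indx],
               c ++ (PySem.List.pyRange 0 (((PySem.List.slice t (some 1) none).length : Nat) : Int) 1).map (fun i => indx + i + 1),
               d ++ [indx], indx + (t.length : Int)) from by
              simp only [pvBodyA]; rw [if_pos h]]
        rw [ih (fun u hu => hcl u (List.mem_cons_of_mem _ hu))]
        simp only [h, beq_self_eq_true, if_true, List.map_cons, List.sum_cons]
        refine Prod.ext ?_ (Prod.ext ?_ (Prod.ext ?_ (Prod.ext ?_ ?_)))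
        · simp [List.append_assoc]
        · simp [List.append_assoc]
        · simp [List.append_assoc]
        · simp [List.append_assoc]
        · simp; ring
      · rw [show pvBodyA vals (a, b, c, d, indx) t
            = (a, b,
               c ++ (PySem.List.pyRange 0 (((PySem.List.slice t (some 1) none).length : Nat) : Int) 1).map (fun i => indx + i + 1),
               d ++ [indx], indx + (t.length : Int)) from by
              simp only [pvBodyA]; rw [if_neg h]]
        rw [ih (fun u hu => hcl u (List.mem_cons_of_mem _ hu))]
        have hb : ((PySem.List.pyGetD t 0 ((0,0) : Int × Int)).2
            == (PySem.List.pyGetD (PySem.List.pyGetD vals (-1) ([] : List (Int × Int))) (-1) ((0,0) : Int × Int)).2) = false := by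
          simp [h]
        simp only [hb, Bool.false_eq_true, if_false, List.map_cons, List.sum_cons]
        refine Prod.ext ?_ (Prod.ext ?_ (Prod.ext ?_ (Prod.ext ?_ ?_)))
        · simp
        · simp
        · simp [List.append_assoc]
        · simp [List.append_assoc]
        · simp; ring

-- ===== VERDICT (by name: the statement is the Claim_ definition above) =====
theorem get_specialized_indices_spec : Claim_equal_get_specialized_indices := by
  intro lv cp _hdom hpre
  unfold Spec_get_specialized_indices get_specialized_indices get_specialized_indices_alt
  simp only [pvFoldA _ _ hpre.2, List.nil_append]
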